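-- pv_equiv track=rewrite | github.com/seungriyou/algorithm-study | _Grind-75/code/2-medium/LC-261_Graph Valid Tree.py | validTree_dfs
-- ===== SOURCE A (Python) =====
-- from typing import List
--
-- def validTree_dfs(n: int, edges: List[List[int]]) -> bool:
--     """
--     tree = acyclic & connected graph
--     [dfs]
--
--     - TC: O(V+E) == O(N) (E가 N에 bounded)
--     - SC: O(N)
--     """
--
--     # early checking (connected & acyclic)
--     if len(edges) != n - 1:
--         return False
--
--     # dfs
--     graph = [[] for _ in range(n)]
--     for a, b in edges:
--         graph[a].append(b)
--         graph[b].append(a)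
--
--     visited = set()
--
--     def dfs(start):
--         # base condition
--         if start in visited:
--             return
--
--         visited.add(start)
--
--         # recur
--         for ngbr in graph[start]:
--             dfs(ngbr)
--
--     # should visit all nodes
--     dfs(0)
--
--     return len(visited) == n
-- ===== SOURCE B (Python) =====
-- from typing import List
--
-- def validTree_dfs(n: int, edges: List[List[int]]) -> bool:
--     # Edge-relaxation fixpoint instead of recursive DFS: grow the set of nodes
--     # known connected to 0 by sweeping the edge list until no sweep adds a node.
--     if len(edges) != n - 1:
--         return False
--     reached = {0}
--     while True:
--         prev = len(reached)
--         for a, b in edges: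
--             if a in reached:
--                 reached.add(b)
--             if b in reached:
--                 reached.add(a)
--         if len(reached) == prev:
--             break
--     return len(reached) == n
-- ===== Notes on version B (the rewrite author's own statement) =====
-- stated objective: alternative
-- what changed: A builds an adjacency list and counts nodes visited by a recursive DFS from node 0; B never builds a graph or recurses: it grows the set of nodes connected to 0 by repeatedly sweeping the raw edge list until a sweep adds nothing, then compares the set's size to n.
-- outside the precondition, e.g. on validTree_dfs(2, [[-2, -2]]): A returns True, B returns False
import Mathlib
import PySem

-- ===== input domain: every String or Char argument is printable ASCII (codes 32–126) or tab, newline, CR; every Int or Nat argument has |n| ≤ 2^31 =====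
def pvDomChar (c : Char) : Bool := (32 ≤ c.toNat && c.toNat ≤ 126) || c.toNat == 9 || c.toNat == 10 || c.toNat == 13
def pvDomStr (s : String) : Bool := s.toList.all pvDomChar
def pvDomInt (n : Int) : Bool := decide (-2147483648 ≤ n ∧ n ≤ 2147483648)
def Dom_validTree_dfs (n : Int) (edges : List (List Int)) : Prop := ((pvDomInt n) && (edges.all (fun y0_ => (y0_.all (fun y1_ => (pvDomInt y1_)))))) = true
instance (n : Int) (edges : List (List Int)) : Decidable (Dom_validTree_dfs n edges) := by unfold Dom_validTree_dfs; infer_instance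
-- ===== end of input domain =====

-- B replaces A's recursive DFS over a built adjacency list by an edge-relaxation fixpoint:
-- sweep the raw edge list, growing the set of nodes known connected to 0, until a sweep adds
-- nothing. Neither version mutates its arguments; the equivalence is about the return value.

-- ===== PORT A =====

-- graph[i].append(x); the index is in range under Pre_ (past the range Python raises
-- IndexError; a negative i wraps — both excluded by Pre_)
def pvAppendAt (g : List (List Int)) (i : Int) (x : Int) : List (List Int) :=
  if 0 ≤ i ∧ i.toNat < g.length then g.set i.toNat ((g.getD i.toNat []) ++ [x]) else g

-- loop body of 'for a, b in edges: graph[a].append(b); graph[b].append(a)'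
-- (the catch-all arm is unreachable under Pre_: Python's unpacking raises there)
def pvBuildStep (g : List (List Int)) (e : List Int) : List (List Int) :=
  match e with
  | [a, b] => pvAppendAt (pvAppendAt g a b) b a
  | _ => g

-- graph = [[] for _ in range(n)] filled by the loop above
def pvBuildGraph (edges : List (List Int)) (g : List (List Int)) : List (List Int) :=
  edges.foldl pvBuildStep g

-- graph[i]; in range under Pre_
def pvNbrs (g : List (List Int)) (i : Int) : List Int := g.getD i.toNat []

-- def dfs(start): …  — fuel bounds the recursion depth; fuel = n+1 is never exhausted under
-- Pre_ (each nested call past the 'start in visited' guard adds one of the n nodes; proved below)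
def pvDfs (g : List (List Int)) : Nat → Int → PySem.Set Int → PySem.Set Int
  | 0, _, visited => visited
  | fuel + 1, start, visited =>
    if visited.contains start then visited
    else (pvNbrs g start).foldl (fun v ngbr => pvDfs g fuel ngbr v) (PySem.Set.add visited start)

def validTree_dfs (n : Int) (edges : List (List Int)) : Bool :=
  if (edges.length : Int) ≠ n - 1 then false
  else
    let graph := pvBuildGraph edges (List.replicate n.toNat [])
    let visited := pvDfs graph (n.toNat + 1) 0 PySem.Set.empty
    ((visited.length : Int) == n)

-- ===== PORT B =====

-- loop body of 'for a, b in edges: …' inside one sweep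
-- (the catch-all arm is unreachable under Pre_: Python's unpacking raises there)
def pvSweepStep (r : PySem.Set Int) (e : List Int) : PySem.Set Int :=
  match e with
  | [a, b] =>
    let r1 := if r.contains a then PySem.Set.add r b else r
    if r1.contains b then PySem.Set.add r1 a else r1
  | _ => r

-- one 'for a, b in edges' sweep of B's while-loop body
def pvSweep (edges : List (List Int)) (r : PySem.Set Int) : PySem.Set Int :=
  edges.foldl pvSweepStep r

-- while True: … if len(reached) == prev: break — fuel = n+1 is never exhausted under Pre_
-- (every iteration but the last grows the set, which holds at most the n nodes; proved below)
def pvRelax (edges : List (List Int)) : Nat → PySem.Set Int → PySem.Set Int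
  | 0, r => r
  | fuel + 1, r =>
    let prev := r.length
    let r' := pvSweep edges r
    if r'.length = prev then r' else pvRelax edges fuel r'

def validTree_dfs_alt (n : Int) (edges : List (List Int)) : Bool :=
  if (edges.length : Int) ≠ n - 1 then false
  else
    let reached := pvRelax edges (n.toNat + 1) (PySem.Set.ofList [0])
    ((reached.length : Int) == n)

-- ===== PRECONDITION & SPEC =====
-- Pre_ excludes inputs where, with len(edges) == n-1 (otherwise A returns False before touching
-- edges), some edge is not a length-2 list (A raises ValueError on unpacking) or has an endpoint
-- outside [0, n): an endpoint ≥ n (or < -n) raises IndexError in A, and a negative endpoint makes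
-- A index the adjacency list with Python's negative-index wraparound, an artefact of its list
-- representation that B (treating labels as plain values) need not reproduce.
def Pre_validTree_dfs (n : Int) (edges : List (List Int)) : Prop :=
  (edges.length : Int) = n - 1 →
    ∀ e ∈ edges, e.length = 2 ∧ ∀ x ∈ e, 0 ≤ x ∧ x < n
instance (n : Int) (edges : List (List Int)) : Decidable (Pre_validTree_dfs n edges) := by
  unfold Pre_validTree_dfs; infer_instance

def pvWitness_validTree_dfs : Int × List (List Int) := (3, [[0, 1], [1, 2]])

def Spec_validTree_dfs (n : Int) (edges : List (List Int)) (out : Bool) : Prop := out = validTree_dfs_alt n edges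
instance (n : Int) (edges : List (List Int)) (out : Bool) : Decidable (Spec_validTree_dfs n edges out) := by unfold Spec_validTree_dfs; infer_instance

-- ===== CLAIM (what is proved, stated in full; the proofs are below) =====
def Claim_equal_validTree_dfs : Prop := ∀ (n : Int) (edges : List (List Int)), Dom_validTree_dfs n edges → Pre_validTree_dfs n edges → Spec_validTree_dfs n edges (validTree_dfs n edges)

-- ===== LEMMAS AND PROOFS =====

-- x is one of the n node labels
def pvNode (n x : Int) : Prop := 0 ≤ x ∧ x < n

-- well-formed edge list (what Pre_ guarantees once the length guard passes)
def pvWF (n : Int) (edges : List (List Int)) : Prop :=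
  ∀ e ∈ edges, e.length = 2 ∧ ∀ x ∈ e, 0 ≤ x ∧ x < n

-- x and y joined by some edge
def pvAdj (edges : List (List Int)) (x y : Int) : Prop :=
  ∃ e ∈ edges, e = [x, y] ∨ e = [y, x]

-- connectivity along edges (the common mathematical spec of both programs)
def pvReach (edges : List (List Int)) (x y : Int) : Prop :=
  Relation.ReflTransGen (pvAdj edges) x y

lemma pv_contains_iff (s : PySem.Set Int) (x : Int) :
    PySem.Set.contains s x = true ↔ x ∈ s := by
  simp [PySem.Set.contains]

lemma pv_add_of_not_mem (s : PySem.Set Int) (x : Int) (h : x ∉ s) :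
    PySem.Set.add s x = s ++ [x] := by
  simp only [PySem.Set.add]
  rw [if_neg]
  simp [h]

lemma pvWF_adj_node {n : Int} {edges : List (List Int)} {x y : Int}
    (hWF : pvWF n edges) (h : pvAdj edges x y) : pvNode n x ∧ pvNode n y := by
  rcases h with ⟨e, he, h | h⟩ <;> subst h <;>
    exact ⟨(hWF _ he).2 _ (by simp), (hWF _ he).2 _ (by simp)⟩

lemma pv_shape2 {e : List Int} (h : e.length = 2) : ∃ a b, e = [a, b] := by
  match e, h with
  | [a, b], _ => exact ⟨a, b, rfl⟩

lemma pv_len_le {l₁ l₂ : List Int} (h₁ : l₁.Nodup) (hsub : l₁ ⊆ l₂) :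
    l₁.length ≤ l₂.length := by
  calc l₁.length = l₁.toFinset.card := (List.toFinset_card_of_nodup h₁).symm
    _ ≤ l₂.toFinset.card := Finset.card_le_card (by intro a; simp only [List.mem_toFinset]; exact fun h => hsub h)
    _ ≤ l₂.length := l₂.toFinset_card_le

lemma pv_card_le {n : Int} {l : List Int} (hnd : l.Nodup) (hn : ∀ x ∈ l, pvNode n x) :
    l.length ≤ n.toNat := by
  calc l.length = l.toFinset.card := (List.toFinset_card_of_nodup hnd).symm
    _ ≤ (Finset.Ico (0 : Int) n).card := by
        apply Finset.card_le_card
        intro a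
        simp only [List.mem_toFinset, Finset.mem_Ico]
        exact fun h => hn a h
    _ = n.toNat := by rw [Int.card_Ico]; omega

lemma pv_memEq_of_subset_len {l₁ l₂ : List Int} (h₁ : l₁.Nodup) (h₂ : l₂.Nodup)
    (hsub : l₁ ⊆ l₂) (hlen : l₂.length ≤ l₁.length) : ∀ y, y ∈ l₁ ↔ y ∈ l₂ := by
  have hfs : l₁.toFinset = l₂.toFinset := by
    apply Finset.eq_of_subset_of_card_le
    · intro a; simp only [List.mem_toFinset]; exact fun h => hsub h
    · rw [List.toFinset_card_of_nodup h₁, List.toFinset_card_of_nodup h₂]; exact hlen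
  intro y
  rw [← List.mem_toFinset, ← List.mem_toFinset (l := l₂), hfs]

lemma pv_len_eq_of_memEq {l₁ l₂ : List Int} (h₁ : l₁.Nodup) (h₂ : l₂.Nodup)
    (hmem : ∀ y, y ∈ l₁ ↔ y ∈ l₂) : l₁.length = l₂.length :=
  ((List.perm_ext_iff_of_nodup h₁ h₂).2 hmem).length_eq

-- ---- the adjacency list built by A ----

lemma pvAppendAt_length (g : List (List Int)) (i x : Int) :
    (pvAppendAt g i x).length = g.length := by
  unfold pvAppendAt; split <;> simp

lemma pvNbrs_appendAt (g : List (List Int)) (i x j : Int)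
    (hi : 0 ≤ i) (hlt : i.toNat < g.length) :
    pvNbrs (pvAppendAt g i x) j =
      if j.toNat = i.toNat then pvNbrs g i ++ [x] else pvNbrs g j := by
  unfold pvAppendAt pvNbrs
  rw [if_pos ⟨hi, hlt⟩]
  rcases eq_or_ne j.toNat i.toNat with h | h
  · rw [if_pos h, h]
    simp [List.getD_eq_getElem?_getD, hlt]
  · rw [if_neg h]
    simp [List.getD_eq_getElem?_getD, List.getElem?_set_ne (Ne.symm h)]

lemma pvNbrs_replicate (k : Nat) (j : Int) :
    pvNbrs (List.replicate k ([] : List Int)) j = [] := by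
  unfold pvNbrs
  simp only [List.getD_eq_getElem?_getD, List.getElem?_replicate]
  split <;> rfl

lemma pvAdj_nil (x y : Int) : ¬ pvAdj [] x y := by
  rintro ⟨e, he, -⟩; simp at he

lemma pvAdj_cons {a b : Int} {es : List (List Int)} {x y : Int} :
    pvAdj ([a, b] :: es) x y ↔ ((x = a ∧ y = b) ∨ (x = b ∧ y = a)) ∨ pvAdj es x y := by
  constructor
  · rintro ⟨e, he, h⟩
    rcases List.mem_cons.1 he with rfl | he'
    · rcases h with h | h
      · exact Or.inl (Or.inl (by simpa using h.symm))
      · have h' : y = a ∧ x = b := by simpa using h.symm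
        exact Or.inl (Or.inr ⟨h'.2, h'.1⟩)
    · exact Or.inr ⟨e, he', h⟩
  · rintro (⟨⟨rfl, rfl⟩ | ⟨rfl, rfl⟩⟩ | ⟨e, he, h⟩)
    · exact ⟨[x, y], by simp, Or.inl rfl⟩
    · exact ⟨[y, x], by simp, Or.inr rfl⟩
    · exact ⟨e, List.mem_cons_of_mem _ he, h⟩


lemma pv_mem_nbrs_build {n : Int} : ∀ (es : List (List Int)) (g : List (List Int)),
    pvWF n es → g.length = n.toNat →
    ∀ x y : Int, pvNode n x →
      (y ∈ pvNbrs (pvBuildGraph es g) x ↔ y ∈ pvNbrs g x ∨ pvAdj es x y) := by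
  intro es
  induction es with
  | nil =>
    intro g _ _ x y _
    simpa [pvBuildGraph] using (fun h => (pvAdj_nil x y h).elim)
  | cons e es ih =>
    intro g hWF hglen x y hx
    obtain ⟨a, b, rfl⟩ := pv_shape2 (hWF e (by simp)).1
    have ha : pvNode n a := (hWF [a, b] (by simp)).2 a (by simp)
    have hb : pvNode n b := (hWF [a, b] (by simp)).2 b (by simp)
    have hstep : pvBuildGraph ([a, b] :: es) g = pvBuildGraph es (pvBuildStep g [a, b]) := rfl
    have hlen1 : (pvBuildStep g [a, b]).length = n.toNat := by
      unfold pvBuildStep; simp [pvAppendAt_length, hglen]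
    rw [hstep, ih _ (fun e' he' => hWF e' (List.mem_cons_of_mem _ he')) hlen1 x y hx, pvAdj_cons]
    have hga : a.toNat < g.length := by rw [hglen]; rcases ha with ⟨h1, h2⟩; omega
    have hga' : a.toNat < (pvAppendAt g a b).length := by rw [pvAppendAt_length]; exact hga
    have hgb' : b.toNat < (pvAppendAt g a b).length := by
      rw [pvAppendAt_length, hglen]; rcases hb with ⟨h1, h2⟩; omega
    have h1 : pvNbrs (pvBuildStep g [a, b]) x =
        if x.toNat = b.toNat then pvNbrs (pvAppendAt g a b) b ++ [a]
        else pvNbrs (pvAppendAt g a b) x := by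
      unfold pvBuildStep
      exact pvNbrs_appendAt _ b a x hb.1 hgb'
    have h2 : ∀ z : Int, pvNbrs (pvAppendAt g a b) z =
        if z.toNat = a.toNat then pvNbrs g a ++ [b] else pvNbrs g z := by
      intro z; exact pvNbrs_appendAt g a b z ha.1 hga
    have key : y ∈ pvNbrs (pvBuildStep g [a, b]) x ↔
        y ∈ pvNbrs g x ∨ ((x = a ∧ y = b) ∨ (x = b ∧ y = a)) := by
      rcases hx with ⟨hx0, hxn⟩
      rcases ha with ⟨ha0, han⟩
      rcases hb with ⟨hb0, hbn⟩
      rw [h1]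
      by_cases hxb : x = b
      · subst hxb
        rw [if_pos rfl, h2 x]
        by_cases hxa : x = a
        · subst hxa
          rw [if_pos rfl]
          simp only [List.mem_append, List.mem_singleton]
          tauto
        · rw [if_neg (by omega)]
          simp only [List.mem_append, List.mem_singleton]
          tauto
      · rw [if_neg (by omega), h2 x]
        by_cases hxa : x = a
        · subst hxa
          rw [if_pos rfl]
          simp only [List.mem_append, List.mem_singleton]
          tauto
        · rw [if_neg (by omega)]
          tauto
    rw [key]
    tauto

-- the graph A builds
def pvG (n : Int) (edges : List (List Int)) : List (List Int) :=
  pvBuildGraph edges (List.replicate n.toNat [])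

lemma pv_mem_nbrs {n : Int} {edges : List (List Int)} (hWF : pvWF n edges)
    {x y : Int} (hx : pvNode n x) : y ∈ pvNbrs (pvG n edges) x ↔ pvAdj edges x y := by
  rw [pvG, pv_mem_nbrs_build edges _ hWF (by simp) x y hx, pvNbrs_replicate]
  simp

-- ---- A's dfs ----

lemma pvDfsFold_mono (g : List (List Int)) (f : Nat)
    (h : ∀ s vis (y : Int), y ∈ vis → y ∈ pvDfs g f s vis) :
    ∀ (l : List Int) (vis : PySem.Set Int) (y : Int), y ∈ vis →
      y ∈ l.foldl (fun v ngbr => pvDfs g f ngbr v) vis := by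
  intro l
  induction l with
  | nil => intro vis y hy; simpa using hy
  | cons a l ih =>
    intro vis y hy
    simpa using ih (pvDfs g f a vis) y (h a vis y hy)

lemma pvDfs_mono (g : List (List Int)) :
    ∀ (f : Nat) (s : Int) (vis : PySem.Set Int) (y : Int), y ∈ vis → y ∈ pvDfs g f s vis := by
  intro f
  induction f with
  | zero => intro s vis y hy; simpa [pvDfs] using hy
  | succ f ih =>
    intro s vis y hy
    rw [pvDfs]
    split
    · exact hy
    · exact pvDfsFold_mono g f ih _ _ y ((PySem.Set.mem_add vis s y).2 (Or.inl hy))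

lemma pvDfs_start_mem (g : List (List Int)) (f : Nat) (s : Int) (vis : PySem.Set Int)
    (hf : 1 ≤ f) : s ∈ pvDfs g f s vis := by
  match f, hf with
  | f + 1, _ =>
    rw [pvDfs]
    split
    · next h => exact (pv_contains_iff vis s).1 h
    · exact pvDfsFold_mono g f (pvDfs_mono g f) _ _ s
        ((PySem.Set.mem_add vis s s).2 (Or.inr rfl))

lemma pvDfsFold_mem_elem (g : List (List Int)) (f : Nat) (hf : 1 ≤ f) :
    ∀ (l : List Int) (vis : PySem.Set Int) (ng : Int), ng ∈ l →
      ng ∈ l.foldl (fun v ngbr => pvDfs g f ngbr v) vis := by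
  intro l
  induction l with
  | nil => intro vis ng h; simp at h
  | cons a l ih =>
    intro vis ng h
    rcases List.mem_cons.1 h with rfl | h'
    · simpa using pvDfsFold_mono g f (pvDfs_mono g f) l _ ng (pvDfs_start_mem g f ng vis hf)
    · simpa using ih (pvDfs g f a vis) ng h'

lemma pvDfs_nodes {n : Int} {edges : List (List Int)} (g : List (List Int))
    (hg : ∀ x y : Int, pvNode n x → (y ∈ pvNbrs g x ↔ pvAdj edges x y)) (hWF : pvWF n edges) :
    ∀ (f : Nat) (s : Int) (vis : PySem.Set Int), pvNode n s → (∀ y ∈ vis, pvNode n y) →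
      ∀ y ∈ pvDfs g f s vis, pvNode n y := by
  intro f
  induction f with
  | zero => intro s vis _ hvis y hy; exact hvis y (by simpa [pvDfs] using hy)
  | succ f ih =>
    intro s vis hs hvis y hy
    rw [pvDfs] at hy
    split at hy
    · exact hvis y hy
    · have hl : ∀ ng ∈ pvNbrs g s, pvNode n ng := fun ng h =>
        (pvWF_adj_node hWF ((hg s ng hs).1 h)).2
      have hacc : ∀ z ∈ PySem.Set.add vis s, pvNode n z := by
        intro z hz
        rcases (PySem.Set.mem_add vis s z).1 hz with h | rfl
        · exact hvis z h
        · exact hs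
      have haux : ∀ (l : List Int) (acc : PySem.Set Int), (∀ ng ∈ l, pvNode n ng) →
          (∀ z ∈ acc, pvNode n z) →
          ∀ y ∈ l.foldl (fun v ngbr => pvDfs g f ngbr v) acc, pvNode n y := by
        intro l
        induction l with
        | nil => intro acc _ hacc' y' hy'; exact hacc' y' (by simpa using hy')
        | cons a l ihl =>
          intro acc hl' hacc' y' hy'
          exact ihl (pvDfs g f a acc)
            (fun ng h => hl' ng (List.mem_cons_of_mem _ h))
            (ih a acc (hl' a (by simp)) hacc') y' (by simpa using hy')
      exact haux (pvNbrs g s) (PySem.Set.add vis s) hl hacc y hy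

lemma pvDfs_nodup (g : List (List Int)) :
    ∀ (f : Nat) (s : Int) (vis : PySem.Set Int), vis.Nodup → (pvDfs g f s vis).Nodup := by
  intro f
  induction f with
  | zero => intro s vis h; simpa [pvDfs] using h
  | succ f ih =>
    intro s vis hvis
    rw [pvDfs]
    split
    · exact hvis
    · have hacc : (PySem.Set.add vis s).Nodup := PySem.Set.nodup_add vis s hvis
      generalize PySem.Set.add vis s = acc at hacc
      generalize pvNbrs g s = l
      induction l generalizing acc with
      | nil => simpa using hacc
      | cons a l ihl => simpa using ihl (pvDfs g f a acc) (ih a acc hacc)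

lemma pvDfs_sound {n : Int} {edges : List (List Int)} (g : List (List Int))
    (hg : ∀ x y : Int, pvNode n x → (y ∈ pvNbrs g x ↔ pvAdj edges x y)) (hWF : pvWF n edges) :
    ∀ (f : Nat) (s : Int) (vis : PySem.Set Int), pvNode n s →
      ∀ y ∈ pvDfs g f s vis, y ∈ vis ∨ pvReach edges s y := by
  intro f
  induction f with
  | zero => intro s vis _ y hy; exact Or.inl (by simpa [pvDfs] using hy)
  | succ f ih =>
    intro s vis hs y hy
    rw [pvDfs] at hy
    split at hy
    · exact Or.inl hy
    · have hl : ∀ ng ∈ pvNbrs g s, pvAdj edges s ng := fun ng h => (hg s ng hs).1 h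
      have hacc : ∀ z ∈ PySem.Set.add vis s, z ∈ vis ∨ pvReach edges s z := by
        intro z hz
        rcases (PySem.Set.mem_add vis s z).1 hz with h | rfl
        · exact Or.inl h
        · exact Or.inr Relation.ReflTransGen.refl
      have haux : ∀ (l : List Int) (acc : PySem.Set Int), (∀ ng ∈ l, pvAdj edges s ng) →
          (∀ z ∈ acc, z ∈ vis ∨ pvReach edges s z) →
          ∀ y ∈ l.foldl (fun v ngbr => pvDfs g f ngbr v) acc, y ∈ vis ∨ pvReach edges s y := by
        intro l
        induction l with
        | nil => intro acc _ hacc' y' hy'; exact hacc' y' (by simpa using hy')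
        | cons a l ihl =>
          intro acc hl' hacc' y' hy'
          refine ihl (pvDfs g f a acc) (fun ng h => hl' ng (List.mem_cons_of_mem _ h)) ?_ y'
            (by simpa using hy')
          intro z hz
          have hna : pvNode n a := (pvWF_adj_node hWF (hl' a (by simp))).2
          rcases ih a acc hna z hz with h | h
          · exact hacc' z h
          · exact Or.inr (Relation.ReflTransGen.head (hl' a (by simp)) h)
      exact haux (pvNbrs g s) (PySem.Set.add vis s) hl hacc y hy

lemma pvDfs_closed {n : Int} {edges : List (List Int)} (g : List (List Int))
    (hg : ∀ x y : Int, pvNode n x → (y ∈ pvNbrs g x ↔ pvAdj edges x y)) (hWF : pvWF n edges) :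
    ∀ (f : Nat) (s : Int) (vis : PySem.Set Int), pvNode n s → (∀ y ∈ vis, pvNode n y) →
      vis.Nodup → n.toNat + 1 ≤ f + vis.length →
      ∀ x, x ∈ pvDfs g f s vis → x ∉ vis → ∀ y, pvAdj edges x y → y ∈ pvDfs g f s vis := by
  intro f
  induction f with
  | zero =>
    intro s vis _ _ _ _ x hx hnx
    exact absurd (by simpa [pvDfs] using hx) hnx
  | succ f ih =>
    intro s vis hs hvis hnd hflen x hx hnx y hadj
    rw [pvDfs] at hx ⊢
    split at hx
    · exact absurd hx hnx
    · next hcond =>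
      rw [if_neg hcond]
      have hsnv : s ∉ vis := fun h => hcond ((pv_contains_iff vis s).2 h)
      have hadd : PySem.Set.add vis s = vis ++ [s] := pv_add_of_not_mem vis s hsnv
      have haddlen : (PySem.Set.add vis s).length = vis.length + 1 := by
        rw [hadd]; simp
      have haddnodes : ∀ z ∈ PySem.Set.add vis s, pvNode n z := by
        intro z hz
        rcases (PySem.Set.mem_add vis s z).1 hz with h | rfl
        · exact hvis z h
        · exact hs
      have haddnd : (PySem.Set.add vis s).Nodup := PySem.Set.nodup_add vis s hnd
      have hviscard : vis.length + 1 ≤ n.toNat := by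
        have : (s :: vis).Nodup := List.nodup_cons.2 ⟨hsnv, hnd⟩
        have hc := pv_card_le this (by
          intro z hz
          rcases List.mem_cons.1 hz with rfl | h
          · exact hs
          · exact hvis z h)
        simpa using hc
      have hf1 : 1 ≤ f := by omega
      have hflen' : n.toNat + 1 ≤ f + (PySem.Set.add vis s).length := by omega
      have hl : ∀ ng ∈ pvNbrs g s, pvNode n ng := fun ng h =>
        (pvWF_adj_node hWF ((hg s ng hs).1 h)).2
      -- the fold-level closure
      have haux : ∀ (l : List Int) (acc : PySem.Set Int), (∀ ng ∈ l, pvNode n ng) →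
          (∀ z ∈ acc, pvNode n z) → acc.Nodup → n.toNat + 1 ≤ f + acc.length →
          ∀ x', x' ∈ l.foldl (fun v ngbr => pvDfs g f ngbr v) acc → x' ∉ acc →
            ∀ y', pvAdj edges x' y' → y' ∈ l.foldl (fun v ngbr => pvDfs g f ngbr v) acc := by
        intro l
        induction l with
        | nil =>
          intro acc _ _ _ _ x' hx' hnx'
          exact absurd (by simpa using hx') hnx'
        | cons a l ihl =>
          intro acc hla hacc hand halen x' hx' hnx' y' hadj'
          simp only [List.foldl_cons] at hx' ⊢
          by_cases hx1 : x' ∈ pvDfs g f a acc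
          · have hy1 : y' ∈ pvDfs g f a acc :=
              ih a acc (hla a (by simp)) hacc hand (by omega) x' hx1 hnx' y' hadj'
            exact pvDfsFold_mono g f (pvDfs_mono g f) l _ y' hy1
          · have hsub : acc ⊆ pvDfs g f a acc := fun z hz => pvDfs_mono g f a acc z hz
            have hlen2 : acc.length ≤ (pvDfs g f a acc).length := pv_len_le hand hsub
            exact ihl (pvDfs g f a acc)
              (fun ng h => hla ng (List.mem_cons_of_mem _ h))
              (pvDfs_nodes g hg hWF f a acc (hla a (by simp)) hacc)
              (pvDfs_nodup g f a acc hand)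
              (by omega) x' hx' hx1 y' hadj'
      by_cases hxadd : x ∈ PySem.Set.add vis s
      · -- then x = s; all neighbours of s land in the fold
        have hxs : x = s := by
          rcases (PySem.Set.mem_add vis s x).1 hxadd with h | rfl
          · exact absurd h hnx
          · rfl
        subst hxs
        have hyn : y ∈ pvNbrs g x := (hg x y hs).2 hadj
        exact pvDfsFold_mem_elem g f hf1 (pvNbrs g x) _ y hyn
      · exact haux (pvNbrs g s) (PySem.Set.add vis s) hl haddnodes haddnd hflen' x hx hxadd y hadj

lemma pvDfs_complete {n : Int} {edges : List (List Int)} (g : List (List Int))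
    (hg : ∀ x y : Int, pvNode n x → (y ∈ pvNbrs g x ↔ pvAdj edges x y)) (hWF : pvWF n edges)
    (hn : 1 ≤ n) : ∀ x, pvReach edges 0 x → x ∈ pvDfs g (n.toNat + 1) 0 [] := by
  intro x h
  induction h with
  | refl => exact pvDfs_start_mem g (n.toNat + 1) 0 [] (by omega)
  | tail _ hbc ihx =>
    exact pvDfs_closed g hg hWF (n.toNat + 1) 0 [] ⟨le_refl 0, hn⟩
      (by intro y hy; simp at hy) List.nodup_nil (by simp) _ ihx (by simp) _ hbc

lemma pvA_char {n : Int} {edges : List (List Int)} (hWF : pvWF n edges) (hn : 1 ≤ n) :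
    ∀ x, x ∈ pvDfs (pvG n edges) (n.toNat + 1) 0 PySem.Set.empty ↔ pvReach edges 0 x := by
  have hg : ∀ x y : Int, pvNode n x → (y ∈ pvNbrs (pvG n edges) x ↔ pvAdj edges x y) :=
    fun x y hx => pv_mem_nbrs hWF hx
  intro x
  constructor
  · intro hx
    rcases pvDfs_sound (pvG n edges) hg hWF (n.toNat + 1) 0 PySem.Set.empty ⟨le_refl 0, hn⟩ x hx with h | h
    · simp [PySem.Set.empty] at h
    · exact h
  · intro hx
    exact pvDfs_complete (pvG n edges) hg hWF hn x hx

-- ---- B's relaxation ----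

lemma pvSweepStep_mono (r : PySem.Set Int) (e : List Int) : r ⊆ pvSweepStep r e := by
  intro y hy
  unfold pvSweepStep
  match e with
  | [] => exact hy
  | [a] => exact hy
  | a :: b :: c :: t => exact hy
  | [a, b] =>
    simp only
    split
    · split
      · exact (PySem.Set.mem_add _ a y).2 (Or.inl ((PySem.Set.mem_add r b y).2 (Or.inl hy)))
      · exact (PySem.Set.mem_add r b y).2 (Or.inl hy)
    · split
      · exact (PySem.Set.mem_add r a y).2 (Or.inl hy)
      · exact hy

lemma pvSweepFold_mono : ∀ (l : List (List Int)) (r : PySem.Set Int),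
    r ⊆ l.foldl pvSweepStep r := by
  intro l
  induction l with
  | nil => intro r y hy; simpa using hy
  | cons e l ih =>
    intro r y hy
    simpa using ih (pvSweepStep r e) (pvSweepStep_mono r e hy)

lemma pvSweepStep_nodes {n : Int} (r : PySem.Set Int) (e : List Int)
    (he : e.length = 2 ∧ ∀ x ∈ e, 0 ≤ x ∧ x < n) (hr : ∀ y ∈ r, pvNode n y) :
    ∀ y ∈ pvSweepStep r e, pvNode n y := by
  obtain ⟨a, b, rfl⟩ := pv_shape2 he.1
  have ha : pvNode n a := he.2 a (by simp)
  have hb : pvNode n b := he.2 b (by simp)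
  intro y hy
  simp only [pvSweepStep] at hy
  split at hy
  · split at hy
    · rcases (PySem.Set.mem_add _ a y).1 hy with hy' | rfl
      · rcases (PySem.Set.mem_add r b y).1 hy' with hy'' | rfl
        · exact hr y hy''
        · exact hb
      · exact ha
    · rcases (PySem.Set.mem_add r b y).1 hy with hy' | rfl
      · exact hr y hy'
      · exact hb
  · split at hy
    · rcases (PySem.Set.mem_add r a y).1 hy with hy' | rfl
      · exact hr y hy'
      · exact ha
    · exact hr y hy

lemma pvSweepStep_nodup (r : PySem.Set Int) (e : List Int) (h : r.Nodup) :
    (pvSweepStep r e).Nodup := by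
  unfold pvSweepStep
  match e with
  | [] => exact h
  | [a] => exact h
  | a :: b :: c :: t => exact h
  | [a, b] =>
    dsimp only
    split <;> split <;>
      first
        | exact PySem.Set.nodup_add _ _ (PySem.Set.nodup_add _ _ h)
        | exact PySem.Set.nodup_add _ _ h
        | exact h

lemma pvSweepStep_sound {edges : List (List Int)} (r : PySem.Set Int) (e : List Int)
    (he : e ∈ edges) (hr : ∀ y ∈ r, pvReach edges 0 y) :
    ∀ y ∈ pvSweepStep r e, pvReach edges 0 y := by
  intro y hy
  unfold pvSweepStep at hy
  match e, he with
  | [], he => exact hr y hy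
  | [a], he => exact hr y hy
  | a :: b :: c :: t, he => exact hr y hy
  | [a, b], he =>
    simp only at hy
    have hab : pvAdj edges a b := ⟨[a, b], he, Or.inl rfl⟩
    have hba : pvAdj edges b a := ⟨[a, b], he, Or.inr rfl⟩
    split at hy
    · next hca =>
      have hra : pvReach edges 0 a := hr a ((pv_contains_iff r a).1 hca)
      have hrb : pvReach edges 0 b := by
        by_cases hbr : b ∈ r
        · exact hr b hbr
        · exact Relation.ReflTransGen.tail hra hab
      split at hy
      · rcases (PySem.Set.mem_add _ a y).1 hy with hy' | rfl
        · rcases (PySem.Set.mem_add r b y).1 hy' with hy'' | rfl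
          · exact hr y hy''
          · exact hrb
        · exact Relation.ReflTransGen.tail hrb hba
      · rcases (PySem.Set.mem_add r b y).1 hy with hy' | rfl
        · exact hr y hy'
        · exact hrb
    · split at hy
      · next hcb =>
        rcases (PySem.Set.mem_add r a y).1 hy with hy' | rfl
        · exact hr y hy'
        · exact Relation.ReflTransGen.tail (hr b ((pv_contains_iff r b).1 hcb)) hba
      · exact hr y hy

lemma pvSweepFold_edge : ∀ (l : List (List Int)) (r : PySem.Set Int) (a b : Int),
    [a, b] ∈ l →
      (a ∈ r → b ∈ l.foldl pvSweepStep r) ∧ (b ∈ r → a ∈ l.foldl pvSweepStep r) := by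
  intro l
  induction l with
  | nil => intro r a b h; simp at h
  | cons e l ih =>
    intro r a b h
    rcases List.mem_cons.1 h with rfl | h'
    · constructor
      · intro har
        apply pvSweepFold_mono l (pvSweepStep r [a, b])
        unfold pvSweepStep
        dsimp only
        rw [if_pos ((pv_contains_iff r a).2 har)]
        split
        · exact (PySem.Set.mem_add _ a b).2 (Or.inl ((PySem.Set.mem_add r b b).2 (Or.inr rfl)))
        · exact (PySem.Set.mem_add r b b).2 (Or.inr rfl)
      · intro hbr
        apply pvSweepFold_mono l (pvSweepStep r [a, b])
        unfold pvSweepStep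
        dsimp only
        split
        · next hca =>
          rw [if_pos ((pv_contains_iff _ b).2 ((PySem.Set.mem_add r b b).2 (Or.inl hbr)))]
          exact (PySem.Set.mem_add _ a a).2 (Or.inr rfl)
        · rw [if_pos ((pv_contains_iff r b).2 hbr)]
          exact (PySem.Set.mem_add r a a).2 (Or.inr rfl)
    · constructor
      · intro har
        simpa using (ih (pvSweepStep r e) a b h').1 (pvSweepStep_mono r e har)
      · intro hbr
        simpa using (ih (pvSweepStep r e) a b h').2 (pvSweepStep_mono r e hbr)

lemma pvSweepStep_congr (r r' : PySem.Set Int) (e : List Int)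
    (h : ∀ y, y ∈ r ↔ y ∈ r') : ∀ y, y ∈ pvSweepStep r e ↔ y ∈ pvSweepStep r' e := by
  intro y
  unfold pvSweepStep
  match e with
  | [] => exact h y
  | [a] => exact h y
  | a :: b :: c :: t => exact h y
  | [a, b] =>
    dsimp only
    have hca : r.contains a = r'.contains a := by
      rcases Bool.eq_false_or_eq_true (r.contains a) with hc | hc <;>
        rcases Bool.eq_false_or_eq_true (r'.contains a) with hc' | hc' <;>
          simp_all [h a]
    rw [hca]
    split
    · next hc =>
      have hcb : (PySem.Set.add r b).contains b = (PySem.Set.add r' b).contains b := by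
        simp [PySem.Set.mem_add]
      rw [hcb]
      split <;> simp [PySem.Set.mem_add, h y]
    · have hcb : r.contains b = r'.contains b := by
        rcases Bool.eq_false_or_eq_true (r.contains b) with hc | hc <;>
          rcases Bool.eq_false_or_eq_true (r'.contains b) with hc' | hc' <;>
            simp_all [h b]
      rw [hcb]
      split <;> simp [PySem.Set.mem_add, h y]

lemma pvSweepFold_congr : ∀ (l : List (List Int)) (r r' : PySem.Set Int),
    (∀ y, y ∈ r ↔ y ∈ r') → ∀ y, y ∈ l.foldl pvSweepStep r ↔ y ∈ l.foldl pvSweepStep r' := by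
  intro l
  induction l with
  | nil => intro r r' h y; simpa using h y
  | cons e l ih =>
    intro r r' h y
    simpa using ih (pvSweepStep r e) (pvSweepStep r' e) (pvSweepStep_congr r r' e h) y

lemma pvSweep_nodes {n : Int} {edges : List (List Int)} (hWF : pvWF n edges)
    (r : PySem.Set Int) (hr : ∀ y ∈ r, pvNode n y) : ∀ y ∈ pvSweep edges r, pvNode n y := by
  unfold pvSweep
  suffices haux : ∀ (l : List (List Int)), (∀ e ∈ l, e.length = 2 ∧ ∀ x ∈ e, 0 ≤ x ∧ x < n) →
      ∀ r, (∀ y ∈ r, pvNode n y) → ∀ y ∈ l.foldl pvSweepStep r, pvNode n y by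
    exact haux edges hWF r hr
  intro l
  induction l with
  | nil => intro _ r hr' y hy; exact hr' y (by simpa using hy)
  | cons e l ih =>
    intro hl r hr' y hy
    exact ih (fun e' he' => hl e' (List.mem_cons_of_mem _ he'))
      (pvSweepStep r e) (pvSweepStep_nodes r e (hl e (by simp)) hr') y (by simpa using hy)

lemma pvSweep_nodup (edges : List (List Int)) (r : PySem.Set Int) (h : r.Nodup) :
    (pvSweep edges r).Nodup := by
  unfold pvSweep
  suffices haux : ∀ (l : List (List Int)) (r : PySem.Set Int), r.Nodup →
      (l.foldl pvSweepStep r).Nodup by exact haux edges r h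
  intro l
  induction l with
  | nil => intro r h; simpa using h
  | cons e l ih => intro r h; simpa using ih (pvSweepStep r e) (pvSweepStep_nodup r e h)

lemma pvSweep_sound (edges : List (List Int)) (r : PySem.Set Int)
    (hr : ∀ y ∈ r, pvReach edges 0 y) : ∀ y ∈ pvSweep edges r, pvReach edges 0 y := by
  unfold pvSweep
  suffices haux : ∀ (l : List (List Int)), (∀ e ∈ l, e ∈ edges) →
      ∀ r, (∀ y ∈ r, pvReach edges 0 y) → ∀ y ∈ l.foldl pvSweepStep r, pvReach edges 0 y by
    exact haux edges (fun e he => he) r hr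
  intro l
  induction l with
  | nil => intro _ r hr' y hy; exact hr' y (by simpa using hy)
  | cons e l ih =>
    intro hl r hr' y hy
    exact ih (fun e' he' => hl e' (List.mem_cons_of_mem _ he'))
      (pvSweepStep r e) (pvSweepStep_sound r e (hl e (by simp)) hr') y (by simpa using hy)

lemma pvRelax_mono (edges : List (List Int)) :
    ∀ (f : Nat) (r : PySem.Set Int), r ⊆ pvRelax edges f r := by
  intro f
  induction f with
  | zero => intro r y hy; simpa [pvRelax] using hy
  | succ f ih =>
    intro r y hy
    rw [pvRelax]
    split
    · exact pvSweepFold_mono edges r hy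
    · exact ih (pvSweep edges r) (pvSweepFold_mono edges r hy)

lemma pvRelax_inv {n : Int} {edges : List (List Int)} (hWF : pvWF n edges) :
    ∀ (f : Nat) (r : PySem.Set Int), r.Nodup → (∀ y ∈ r, pvNode n y) →
      (∀ y ∈ r, pvReach edges 0 y) →
      (pvRelax edges f r).Nodup ∧ (∀ y ∈ pvRelax edges f r, pvNode n y) ∧
        (∀ y ∈ pvRelax edges f r, pvReach edges 0 y) := by
  intro f
  induction f with
  | zero => intro r h1 h2 h3; exact ⟨h1, h2, h3⟩
  | succ f ih =>
    intro r h1 h2 h3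
    rw [pvRelax]
    split
    · exact ⟨pvSweep_nodup edges r h1, pvSweep_nodes hWF r h2, pvSweep_sound edges r h3⟩
    · exact ih (pvSweep edges r) (pvSweep_nodup edges r h1) (pvSweep_nodes hWF r h2)
        (pvSweep_sound edges r h3)

lemma pvRelax_fix {n : Int} {edges : List (List Int)} (hWF : pvWF n edges) :
    ∀ (f : Nat) (r : PySem.Set Int), r.Nodup → (∀ y ∈ r, pvNode n y) →
      n.toNat + 1 ≤ f + r.length →
      ∀ y, y ∈ pvSweep edges (pvRelax edges f r) ↔ y ∈ pvRelax edges f r := by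
  intro f
  induction f with
  | zero =>
    intro r h1 h2 hlen
    have := pv_card_le h1 h2
    omega
  | succ f ih =>
    intro r h1 h2 hlen
    rw [pvRelax]
    split
    · next heq =>
      -- the sweep added nothing: r and sweep r have the same members
      have hmem : ∀ y, y ∈ r ↔ y ∈ pvSweep edges r :=
        pv_memEq_of_subset_len h1 (pvSweep_nodup edges r h1)
          (pvSweepFold_mono edges r) (le_of_eq heq)
      intro y
      exact Iff.symm (pvSweepFold_congr edges r (pvSweep edges r) hmem y)
    · next hne =>
      have hsub : r ⊆ pvSweep edges r := pvSweepFold_mono edges r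
      have hle : r.length ≤ (pvSweep edges r).length := pv_len_le h1 hsub
      exact ih (pvSweep edges r) (pvSweep_nodup edges r h1) (pvSweep_nodes hWF r h2)
        (by omega)

lemma pvB_char {n : Int} {edges : List (List Int)} (hWF : pvWF n edges) (hn : 1 ≤ n) :
    ∀ x, x ∈ pvRelax edges (n.toNat + 1) (PySem.Set.ofList [0]) ↔ pvReach edges 0 x := by
  have h0 : (PySem.Set.ofList [(0 : Int)]) = [0] := rfl
  rw [h0]
  have h1 : ([(0 : Int)] : List Int).Nodup := by simp
  have h2 : ∀ y ∈ ([(0 : Int)] : List Int), pvNode n y := by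
    intro y hy; simp at hy; subst hy; exact ⟨le_refl 0, hn⟩
  have hfix := pvRelax_fix hWF (n.toNat + 1) [0] h1 h2 (by simp)
  intro x
  constructor
  · intro hx
    exact (pvRelax_inv hWF (n.toNat + 1) [0] h1 h2
      (by intro y hy; simp at hy; subst hy; exact Relation.ReflTransGen.refl)).2.2 x hx
  · intro hx
    induction hx with
    | refl => exact pvRelax_mono edges (n.toNat + 1) [0] (by simp)
    | tail _ hbc ihx =>
      rename_i b c _
      rcases hbc with ⟨e, he, h | h⟩
      · subst h
        exact (hfix c).1 ((pvSweepFold_edge edges _ b c he).1 ihx)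
      · subst h
        exact (hfix c).1 ((pvSweepFold_edge edges _ c b he).2 ihx)

-- ===== VERDICT (by name: the statement is the Claim_ definition above) =====
theorem validTree_dfs_spec : Claim_equal_validTree_dfs := by
  intro n edges _hDom hPre
  unfold Spec_validTree_dfs
  by_cases hguard : (edges.length : Int) = n - 1
  · have hWF : pvWF n edges := fun e he => hPre hguard e he
    have hn : 1 ≤ n := by
      have h0 : (0 : Int) ≤ (edges.length : Int) := Int.natCast_nonneg _
      omega
    unfold validTree_dfs validTree_dfs_alt
    rw [if_neg (not_not_intro hguard), if_neg (not_not_intro hguard)]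
    have hA := pvA_char hWF hn
    have hB := pvB_char hWF hn
    have hndA : (pvDfs (pvG n edges) (n.toNat + 1) 0 PySem.Set.empty).Nodup :=
      pvDfs_nodup (pvG n edges) (n.toNat + 1) 0 PySem.Set.empty List.nodup_nil
    have hndB : (pvRelax edges (n.toNat + 1) (PySem.Set.ofList [0])).Nodup := by
      have := pvRelax_inv hWF (n.toNat + 1) [0] (by simp)
        (by intro y hy; simp at hy; subst hy; exact ⟨le_refl 0, hn⟩)
        (by intro y hy; simp at hy; subst hy; exact Relation.ReflTransGen.refl)
      exact this.1
    have hmem : ∀ y, y ∈ pvDfs (pvG n edges) (n.toNat + 1) 0 PySem.Set.empty ↔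
        y ∈ pvRelax edges (n.toNat + 1) (PySem.Set.ofList [0]) := by
      intro y; rw [hA y, ← hB y]
    have hlen := pv_len_eq_of_memEq hndA hndB hmem
    show (((pvDfs (pvG n edges) (n.toNat + 1) 0 PySem.Set.empty).length : Int) == n) =
      (((pvRelax edges (n.toNat + 1) (PySem.Set.ofList [0])).length : Int) == n)
    rw [hlen]
  · unfold validTree_dfs validTree_dfs_alt
    rw [if_pos hguard, if_pos hguard]
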